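-- pv_equiv track=rewrite | github.com/BKaur5/Unsupervised-Chunking-with-HRNN | library/new_notation_conversion.py | convert_to_new_notation
-- ===== SOURCE A (Python) =====
-- def convert_to_new_notation(words, labels):
--     new_notation = []
--     current_chunk = []
--
--     for word, label in zip(words, labels):
--         if label == '2':  # Word boundary
--             if current_chunk:
--                 new_notation.append(current_chunk)
--             current_chunk = [word]
--         else:
--             current_chunk.append(word)
--
--     if current_chunk:
--         new_notation.append(current_chunk)
--
--     return new_notation
-- ===== SOURCE B (Python) =====
-- def convert_to_new_notation(words, labels):
--     # Traverse the zipped (word, label) pairs RIGHT-TO-LEFT, building each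
--     # chunk (and the list of chunks) back-to-front, then reverse at the end.
--     chunks_rev = []
--     cur_rev = []
--     for word, label in reversed(list(zip(words, labels))):
--         cur_rev.append(word)
--         if label == '2':
--             chunks_rev.append(cur_rev[::-1])
--             cur_rev = []
--     if cur_rev:
--         chunks_rev.append(cur_rev[::-1])
--     return chunks_rev[::-1]
-- ===== Notes on version B (the rewrite author's own statement) =====
-- stated objective: alternative
-- what changed: B traverses the zipped pairs right-to-left, building each chunk and the chunk list back-to-front and reversing once at the end, instead of A's forward scan with a pending current_chunk flushed on each boundary.
import Mathlib
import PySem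

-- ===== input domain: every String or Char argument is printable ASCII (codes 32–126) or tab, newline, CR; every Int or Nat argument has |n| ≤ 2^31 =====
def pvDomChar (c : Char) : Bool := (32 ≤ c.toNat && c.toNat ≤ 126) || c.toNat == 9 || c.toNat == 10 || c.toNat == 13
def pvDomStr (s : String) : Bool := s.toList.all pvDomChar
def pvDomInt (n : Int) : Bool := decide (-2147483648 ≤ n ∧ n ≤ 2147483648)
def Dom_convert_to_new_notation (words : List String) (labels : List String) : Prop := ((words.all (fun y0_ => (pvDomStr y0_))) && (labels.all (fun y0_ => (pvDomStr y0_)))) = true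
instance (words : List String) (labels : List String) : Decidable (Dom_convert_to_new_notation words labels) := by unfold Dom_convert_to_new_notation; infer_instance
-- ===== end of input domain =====

-- B rebuilds the chunks by a right-to-left traversal (back-to-front construction);
-- same cost as A, a genuinely different traversal (objective: alternative).

-- ===== PORT A =====
-- forward scan: flush current_chunk (if nonempty) on each '2' boundary, flush the rest at the end
def convert_to_new_notation (words : List String) (labels : List String) : List (List String) :=
  let st := (words.zip labels).foldl
    (fun (st : List (List String) × List String) p =>
      if p.2 == "2" then
        ((if st.2 = [] then st.1 else st.1 ++ [st.2]), [p.1])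
      else
        (st.1, st.2 ++ [p.1]))
    ([], [])
  if st.2 = [] then st.1 else st.1 ++ [st.2]

-- ===== PORT B =====
-- right-to-left scan over the reversed pairs; cur collects a chunk's words in reverse,
-- a chunk is emitted (reversed back) when its leading '2' label is met; reverse chunks at the end
def convert_to_new_notation_alt (words : List String) (labels : List String) : List (List String) :=
  let st := (words.zip labels).reverse.foldl
    (fun (st : List (List String) × List String) p =>
      let cur := st.2 ++ [p.1]
      if p.2 == "2" then (st.1 ++ [cur.reverse], ([] : List String)) else (st.1, cur))
    ([], [])
  let chunks := if st.2 = [] then st.1 else st.1 ++ [st.2.reverse]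
  chunks.reverse

-- ===== PRECONDITION & SPEC =====
def Spec_convert_to_new_notation (words : List String) (labels : List String) (out : List (List String)) : Prop := out = convert_to_new_notation_alt words labels
instance (words : List String) (labels : List String) (out : List (List String)) : Decidable (Spec_convert_to_new_notation words labels out) := by unfold Spec_convert_to_new_notation; infer_instance

-- ===== CLAIM (what is proved, stated in full; the proofs are below) =====
def Claim_equal_convert_to_new_notation : Prop := ∀ (words : List String) (labels : List String), Dom_convert_to_new_notation words labels → Spec_convert_to_new_notation words labels (convert_to_new_notation words labels)


-- ===== LEMMAS AND PROOFS =====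

-- span of the longest prefix whose labels are not '2' (proof-side specification)
def spanNB : List (String × String) → List (String × String) × List (String × String)
  | [] => ([], [])
  | p :: rest => if p.2 = "2" then ([], p :: rest) else (p :: (spanNB rest).1, (spanNB rest).2)

theorem spanNB_len (l : List (String × String)) : (spanNB l).2.length ≤ l.length := by
  induction l with
  | nil => simp [spanNB]
  | cons p rest ih =>
    simp only [spanNB]
    split
    · simp
    · simpa using Nat.le_succ_of_le ih

-- the chunking both programs compute (proof-side specification)
def splitChunks : List (String × String) → List (List String)
  | [] => []
  | p :: rest =>
    (p.1 :: ((spanNB rest).1.map Prod.fst)) :: splitChunks (spanNB rest).2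
termination_by l => l.length
decreasing_by exact Nat.lt_succ_of_le (spanNB_len rest)

theorem splitChunks_nil : splitChunks [] = [] := by rw [splitChunks]

theorem splitChunks_cons (p : String × String) (rest : List (String × String)) :
    splitChunks (p :: rest) =
    (p.1 :: ((spanNB rest).1.map Prod.fst)) :: splitChunks (spanNB rest).2 := by
  rw [splitChunks]

def stepA (st : List (List String) × List String) (p : String × String) :
    List (List String) × List String :=
  if p.2 == "2" then ((if st.2 = [] then st.1 else st.1 ++ [st.2]), [p.1])
  else (st.1, st.2 ++ [p.1])

def stepB (st : List (List String) × List String) (p : String × String) :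
    List (List String) × List String :=
  let cur := st.2 ++ [p.1]
  if p.2 == "2" then (st.1 ++ [cur.reverse], ([] : List String)) else (st.1, cur)

theorem convA_eq (words labels : List String) :
    convert_to_new_notation words labels =
    (let st := (words.zip labels).foldl stepA ([], [])
     if st.2 = [] then st.1 else st.1 ++ [st.2]) := rfl

theorem convB_eq (words labels : List String) :
    convert_to_new_notation_alt words labels =
    (let st := (words.zip labels).reverse.foldl stepB ([], [])
     (if st.2 = [] then st.1 else st.1 ++ [st.2.reverse]).reverse) := rfl

theorem lemA (pairs : List (String × String)) :
    ∀ (acc : List (List String)) (cur : List String), cur ≠ [] →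
    (let st := pairs.foldl stepA (acc, cur)
     if st.2 = [] then st.1 else st.1 ++ [st.2]) =
    acc ++ ((cur ++ (spanNB pairs).1.map Prod.fst) :: splitChunks (spanNB pairs).2) := by
  induction pairs with
  | nil => intro acc cur h; simp [spanNB, splitChunks_nil, h]
  | cons p rest ih =>
    intro acc cur h
    by_cases hp : p.2 = "2"
    · have h1 : stepA (acc, cur) p = (acc ++ [cur], [p.1]) := by
        simp [stepA, hp, h]
      simp only [List.foldl_cons, h1, ih (acc ++ [cur]) [p.1] (by simp), spanNB, hp,
        if_true, splitChunks_cons]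
      simp
    · have h1 : stepA (acc, cur) p = (acc, cur ++ [p.1]) := by
        simp [stepA, hp]
      simp only [List.foldl_cons, h1, ih acc (cur ++ [p.1]) (by simp), spanNB, hp]
      simp

theorem A_eq_splitChunks (words labels : List String) :
    convert_to_new_notation words labels = splitChunks (words.zip labels) := by
  rw [convA_eq]
  cases hz : words.zip labels with
  | nil => simp [splitChunks_nil]
  | cons p rest =>
    have h1 : stepA (([] : List (List String)), ([] : List String)) p = ([], [p.1]) := by
      by_cases hp : p.2 = "2" <;> simp [stepA, hp]
    simp only [List.foldl_cons, h1, lemA rest [] [p.1] (by simp), splitChunks_cons]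
    simp

theorem lemB (pairs : List (String × String)) :
    pairs.reverse.foldl stepB ([], []) =
    ((splitChunks (spanNB pairs).2).reverse, ((spanNB pairs).1.map Prod.fst).reverse) := by
  induction pairs with
  | nil => simp [spanNB, splitChunks_nil]
  | cons p rest ih =>
    rw [show (p :: rest).reverse = rest.reverse ++ [p] by simp, List.foldl_append, ih]
    by_cases hp : p.2 = "2"
    · simp [stepB, hp, spanNB, splitChunks_cons]
    · simp [stepB, hp, spanNB]

theorem B_eq_splitChunks (words labels : List String) :
    convert_to_new_notation_alt words labels = splitChunks (words.zip labels) := by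
  rw [convB_eq]
  show (let st := (words.zip labels).reverse.foldl stepB ([], []); _) = _
  rw [lemB]
  cases hz : words.zip labels with
  | nil => simp [spanNB, splitChunks_nil]
  | cons p rest =>
    by_cases hp : p.2 = "2"
    · simp [spanNB, hp, splitChunks_cons]
    · simp [spanNB, hp, splitChunks_cons]

-- ===== VERDICT (by name: the statement is the Claim_ definition above) =====
theorem convert_to_new_notation_spec : Claim_equal_convert_to_new_notation := by
  intro words labels _
  unfold Spec_convert_to_new_notation
  rw [A_eq_splitChunks, B_eq_splitChunks]
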